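-- pv_equiv track=rewrite | github.com/IRubin1010/HomeWork | jack-compiler/ex4/jack_tokenizer.py | split_line
-- ===== SOURCE A (Python) =====
-- symbols = ["{", "}", "(", ")", "[", "]", ".", ",", ";", "+", "-", "*", "/", "&", "|", "<", ">", "=", "~"]
--
-- def split_tight_words(text):
--     for ch in symbols:
--         if ch in text:
--             text = text.replace(ch, " {} ".format(ch))
--     return text
--
-- def split_line(line):
--     splitted_line = line.split()
--     s = []
--     for word in splitted_line:
--         if is_string(word):
--             s.append(word)
--         else:
--             s.extend(split_tight_words(word).split())
--     return s
--
-- def is_string(word):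
--     if word.startswith('"') and word.endswith('"'):
--         return True
--     return False
-- ===== SOURCE B (Python) =====
-- SYMBOL_SET = frozenset("{}()[].,;+-*/&|<>=~")
--
-- def is_string(word):
--     if word.startswith('"') and word.endswith('"'):
--         return True
--     return False
--
-- def split_line(line):
--     tokens = []
--     for word in line.split():
--         if is_string(word):
--             tokens.append(word)
--         else:
--             buf = []
--             for ch in word:
--                 if ch in SYMBOL_SET:
--                     if buf:
--                         tokens.append(''.join(buf))
--                         buf = []
--                     tokens.append(ch)
--                 else:
--                     buf.append(ch)
--             if buf:
--                 tokens.append(''.join(buf))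
--     return tokens
-- ===== Notes on version B (the rewrite author's own statement) =====
-- stated objective: idiomatic
-- what changed: A pads each word by up to 19 sequential whole-string replace passes (one per symbol) and re-splits the padded text; B tokenizes each word in a single character scan with a buffer, flushing the buffer at symbols and emitting each symbol as its own token.
import Mathlib
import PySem

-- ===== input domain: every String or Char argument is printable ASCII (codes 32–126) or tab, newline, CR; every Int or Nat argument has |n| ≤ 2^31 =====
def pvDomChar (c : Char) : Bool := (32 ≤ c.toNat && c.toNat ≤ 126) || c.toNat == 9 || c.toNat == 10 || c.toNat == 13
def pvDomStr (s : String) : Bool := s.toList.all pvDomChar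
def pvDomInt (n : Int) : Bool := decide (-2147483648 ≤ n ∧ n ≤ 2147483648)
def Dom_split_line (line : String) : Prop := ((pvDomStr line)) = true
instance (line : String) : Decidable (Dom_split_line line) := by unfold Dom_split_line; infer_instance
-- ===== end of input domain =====

-- B replaces A's 19 sequential whole-string replace-then-resplit passes per word by one
-- character scan with a buffer (idiomatic tokenizer loop); same return value, proved below.

-- ===== PORT A =====
def pvSymbols : List Char :=
  ['{', '}', '(', ')', '[', ']', '.', ',', ';', '+', '-', '*', '/', '&', '|', '<', '>', '=', '~']

-- split_tight_words: for each symbol ch, if ch in text: text = text.replace(ch, " ch ")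
def pvSplitTight (text : List Char) : List Char :=
  pvSymbols.foldl
    (fun t a => if PySem.Chars.isIn [a] t then PySem.Chars.replace t [a] [' ', a, ' '] else t)
    text

-- is_string: word.startswith('"') and word.endswith('"')
def pvIsString (w : List Char) : Bool :=
  PySem.Chars.startswith w ['"'] && PySem.Chars.endswith w ['"']

def split_line (line : String) : List String :=
  ((PySem.Chars.split₀ line.toList).foldl
    (fun s w =>
      if pvIsString w then s ++ [w]
      else s ++ PySem.Chars.split₀ (pvSplitTight w)) []).map String.ofList

-- ===== PORT B =====
def pvSymSet : PySem.Set Char := PySem.Set.ofList "{}()[].,;+-*/&|<>=~".toList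

def pvIsSym (c : Char) : Bool := pvSymSet.contains c

def pvIsStringAlt (w : List Char) : Bool :=
  PySem.Chars.startswith w ['"'] && PySem.Chars.endswith w ['"']

-- the buffer scan of Source B: flush the buffer before a symbol, emit the symbol, flush at the end
def pvScan (toks : List (List Char)) (buf : List Char) : List Char → List (List Char)
  | [] => if buf.isEmpty then toks else toks ++ [buf]
  | c :: cs =>
      if pvIsSym c then
        pvScan ((if buf.isEmpty then toks else toks ++ [buf]) ++ [[c]]) [] cs
      else
        pvScan toks (buf ++ [c]) cs

def split_line_alt (line : String) : List String :=
  ((PySem.Chars.split₀ line.toList).foldl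
    (fun toks w => if pvIsStringAlt w then toks ++ [w] else pvScan toks [] w) []).map String.ofList

-- ===== PRECONDITION & SPEC =====
def Spec_split_line (line : String) (out : List String) : Prop := out = split_line_alt line
instance (line : String) (out : List String) : Decidable (Spec_split_line line out) := by unfold Spec_split_line; infer_instance

-- ===== CLAIM (what is proved, stated in full; the proofs are below) =====
def Claim_equal_split_line : Prop := ∀ (line : String), Dom_split_line line → Spec_split_line line (split_line line)

-- ===== LEMMAS AND PROOFS =====

-- the padding A's replaces produce, char by char: a symbol becomes " c ", anything else stays
def pvPad (P : Char → Bool) (cs : List Char) : List Char :=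
  cs.flatMap (fun c => if P c then [' ', c, ' '] else [c])

-- one-step equations for split₀.go
theorem pvGo_nil (cur : List Char) (accs : List (List Char)) :
    PySem.Chars.split₀.go [] cur accs
      = if cur.isEmpty then accs.reverse else (cur.reverse :: accs).reverse := by
  simp only [PySem.Chars.split₀.go]

theorem pvGo_space (c : Char) (s cur : List Char) (accs : List (List Char))
    (h : PySem.Chars.isspace c = true) :
    PySem.Chars.split₀.go (c :: s) cur accs
      = if cur.isEmpty then PySem.Chars.split₀.go s [] accs
        else PySem.Chars.split₀.go s [] (cur.reverse :: accs) := by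
  simp only [PySem.Chars.split₀.go, h, if_true]

theorem pvGo_char (c : Char) (s cur : List Char) (accs : List (List Char))
    (h : PySem.Chars.isspace c = false) :
    PySem.Chars.split₀.go (c :: s) cur accs = PySem.Chars.split₀.go s (c :: cur) accs := by
  simp only [PySem.Chars.split₀.go, h, Bool.false_eq_true, if_false]

-- replace with a single-char pattern is a per-character flatMap
theorem pvReplaceGo_char (a : Char) (r : List Char) :
    ∀ (fuel : Nat) (t acc : List Char), t.length ≤ fuel →
      PySem.Chars.replace.go [a] r fuel t acc
        = acc.reverse ++ t.flatMap (fun c => if c = a then r else [c]) := by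
  intro fuel
  induction fuel with
  | zero =>
      intro t acc h
      have : t = [] := List.eq_nil_of_length_eq_zero (Nat.le_zero.mp h)
      subst this; simp [PySem.Chars.replace.go]
  | succ n ih =>
      intro t acc h
      cases t with
      | nil => simp [PySem.Chars.replace.go]
      | cons c t' =>
          by_cases hc : c = a
          · subst hc
            have hpre : [c].isPrefixOf (c :: t') = true := by simp [List.isPrefixOf]
            simp only [PySem.Chars.replace.go, hpre, if_pos, List.length_cons, List.length_nil,
              List.drop_succ_cons, List.drop_zero]
            rw [ih t' (r.reverse ++ acc) (by simpa using Nat.le_of_succ_le_succ h)]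
            simp
          · have hpre : [a].isPrefixOf (c :: t') = false := by
              simp [List.isPrefixOf]; exact fun h' => (hc h'.symm).elim
            simp only [PySem.Chars.replace.go, hpre, Bool.false_eq_true, if_false]
            rw [ih t' (c :: acc) (by simpa using Nat.le_of_succ_le_succ h)]
            simp [hc]

theorem pvReplace_char (a : Char) (r t : List Char) :
    PySem.Chars.replace t [a] r = t.flatMap (fun c => if c = a then r else [c]) := by
  simp only [PySem.Chars.replace, List.isEmpty_cons, Bool.false_eq_true, if_false]
  exact pvReplaceGo_char a r t.length t [] (le_refl _)

-- one pass of A's loop pads exactly the new symbol (whether or not the guard fires)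
theorem pvStep_pad (a : Char) (P : Char → Bool) (cs : List Char)
    (hPa : P a = false) (hsp : a ≠ ' ') :
    (if PySem.Chars.isIn [a] (pvPad P cs)
      then PySem.Chars.replace (pvPad P cs) [a] [' ', a, ' ']
      else pvPad P cs)
      = pvPad (fun c => P c || c == a) cs := by
  have hsp' : ' ' ≠ a := Ne.symm hsp
  by_cases hin : PySem.Chars.isIn [a] (pvPad P cs) = true
  · rw [if_pos hin, pvReplace_char, pvPad, pvPad, List.flatMap_assoc]
    apply List.flatMap_congr
    intro c _
    by_cases hPc : P c = true
    · have hca : c ≠ a := fun h => by rw [h, hPa] at hPc; exact absurd hPc (by simp)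
      simp [hPc, hca, hsp']
    · simp only [Bool.not_eq_true] at hPc
      by_cases hca : c = a
      · subst hca; simp [hPc]
      · simp [hPc, hca]
  · rw [if_neg hin]
    have hnin : a ∉ pvPad P cs := by
      intro hmem
      exact ((PySem.Chars.isIn_eq_false_iff [a] (pvPad P cs)).mp (by simpa using hin))
        ((List.singleton_infix_iff a _).mpr hmem)
    apply (List.flatMap_congr _).symm
    intro c hc
    by_cases hPc : P c = true
    · simp [hPc]
    · simp only [Bool.not_eq_true] at hPc
      have : c ∈ pvPad P cs := by
        apply List.mem_flatMap.mpr
        exact ⟨c, hc, by simp [hPc]⟩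
      have hca : c ≠ a := fun h => hnin (h ▸ this)
      simp [hPc, hca]

-- folding A's loop over a list of fresh symbols pads all of them
theorem pvFold_pad :
    ∀ (syms : List Char) (P : Char → Bool) (cs : List Char),
      (∀ a ∈ syms, P a = false) → ' ' ∉ syms → syms.Nodup →
      syms.foldl
        (fun t a => if PySem.Chars.isIn [a] t then PySem.Chars.replace t [a] [' ', a, ' '] else t)
        (pvPad P cs)
      = pvPad (fun c => P c || syms.contains c) cs := by
  intro syms
  induction syms with
  | nil => intro P cs _ _ _; simp [pvPad]
  | cons a syms ih =>
      intro P cs hP hsp hnd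
      simp only [List.foldl_cons]
      rw [pvStep_pad a P cs (hP a (List.mem_cons_self)) (fun h => hsp (h ▸ List.mem_cons_self))]
      rw [ih (fun c => P c || c == a) cs
        (fun b hb => by
          have hba : b ≠ a := fun h => (List.nodup_cons.mp hnd).1 (h ▸ hb)
          simp [hP b (List.mem_cons_of_mem a hb), hba])
        (fun h => hsp (List.mem_cons_of_mem a h))
        (List.nodup_cons.mp hnd).2]
      apply List.flatMap_congr
      intro c _
      simp only [List.contains_cons, Bool.or_assoc]

theorem pvSplitTight_pad (cs : List Char) :
    pvSplitTight cs = pvPad (fun c => pvSymbols.contains c) cs := by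
  have h := pvFold_pad pvSymbols (fun _ => false) cs (fun _ _ => rfl) (by decide) (by decide)
  simp only [pvPad, Bool.false_or] at h
  simpa [pvSplitTight, pvPad, List.flatMap_singleton'] using h

theorem pvIsSym_eq (c : Char) : pvIsSym c = pvSymbols.contains c := by
  have h : pvSymSet = pvSymbols := by decide
  simp [pvIsSym, PySem.Set.contains, h]

-- the token accumulator of split₀.go appends
theorem pvGo_acc :
    ∀ (s cur : List Char) (accs : List (List Char)),
      PySem.Chars.split₀.go s cur accs
        = accs.reverse ++ PySem.Chars.split₀.go s cur [] := by
  intro s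
  induction s with
  | nil =>
      intro cur accs
      rw [pvGo_nil, pvGo_nil]
      cases h : cur.isEmpty <;> simp
  | cons c s ih =>
      intro cur accs
      cases hsp : PySem.Chars.isspace c
      · rw [pvGo_char c s cur accs hsp, pvGo_char c s cur [] hsp]
        exact ih (c :: cur) accs
      · rw [pvGo_space c s cur accs hsp, pvGo_space c s cur [] hsp]
        cases hcur : cur.isEmpty
        · simp only [Bool.false_eq_true, if_false]
          rw [ih [] (cur.reverse :: accs), ih [] [cur.reverse]]
          simp
        · simp only [if_true]
          exact ih [] accs

-- a whitespace-free run is folded into the current word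
theorem pvGo_run :
    ∀ (t s cur : List Char) (accs : List (List Char)),
      (∀ c ∈ t, PySem.Chars.isspace c = false) →
      PySem.Chars.split₀.go (t ++ s) cur accs
        = PySem.Chars.split₀.go s (t.reverse ++ cur) accs := by
  intro t
  induction t with
  | nil => intro s cur accs _; simp
  | cons c t ih =>
      intro s cur accs h
      have hc : PySem.Chars.isspace c = false := h c List.mem_cons_self
      rw [List.cons_append, pvGo_char c (t ++ s) cur accs hc,
        ih s (c :: cur) accs (fun d hd => h d (List.mem_cons_of_mem c hd))]
      simp

-- every word split() produces has no whitespace characters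
theorem pvGo_nonspace :
    ∀ (s cur : List Char) (accs : List (List Char)),
      (∀ c ∈ cur, PySem.Chars.isspace c = false) →
      (∀ w ∈ accs, ∀ c ∈ w, PySem.Chars.isspace c = false) →
      ∀ w ∈ PySem.Chars.split₀.go s cur accs, ∀ c ∈ w, PySem.Chars.isspace c = false := by
  intro s
  induction s with
  | nil =>
      intro cur accs hcur haccs w hw
      rw [pvGo_nil] at hw
      cases h : cur.isEmpty
      · rw [h] at hw
        simp only [Bool.false_eq_true, if_false, List.reverse_cons, List.mem_append,
          List.mem_reverse, List.mem_cons] at hw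
        rcases hw with hw | hw
        · exact haccs w hw
        · rcases hw with hw | hw
          · subst hw; intro c hc; exact hcur c (by simpa using hc)
          · simp at hw
      · rw [h] at hw
        simp only [if_true, List.mem_reverse] at hw
        exact haccs w hw
  | cons c s ih =>
      intro cur accs hcur haccs w hw
      cases hsp : PySem.Chars.isspace c
      · rw [pvGo_char c s cur accs hsp] at hw
        refine ih (c :: cur) accs ?_ haccs w hw
        intro d hd
        rcases List.mem_cons.mp hd with hd | hd
        · subst hd; exact hsp
        · exact hcur d hd
      · rw [pvGo_space c s cur accs hsp] at hw
        cases hcure : cur.isEmpty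
        · rw [hcure] at hw
          simp only [Bool.false_eq_true, if_false] at hw
          refine ih [] (cur.reverse :: accs) (by simp) ?_ w hw
          intro v hv
          rcases List.mem_cons.mp hv with hv | hv
          · subst hv; intro d hd; exact hcur d (by simpa using hd)
          · exact haccs v hv
        · rw [hcure] at hw
          simp only [if_true] at hw
          exact ih [] accs (by simp) haccs w hw

theorem pvWords_nonspace (s : List Char) :
    ∀ w ∈ PySem.Chars.split₀ s, ∀ c ∈ w, PySem.Chars.isspace c = false := by
  intro w hw
  exact pvGo_nonspace s [] [] (by simp) (by simp) w hw

-- pvScan's token accumulator appends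
theorem pvScan_acc :
    ∀ (cs : List Char) (toks : List (List Char)) (buf : List Char),
      pvScan toks buf cs = toks ++ pvScan [] buf cs := by
  intro cs
  induction cs with
  | nil => intro toks buf; cases h : buf.isEmpty <;> simp [pvScan, h]
  | cons c cs ih =>
      intro toks buf
      cases hc : pvIsSym c
      · simp only [pvScan, hc, Bool.false_eq_true, if_false]
        exact ih toks (buf ++ [c])
      · cases hb : buf.isEmpty
        · simp only [pvScan, hc, hb, if_true, Bool.false_eq_true, if_false]
          rw [ih ((toks ++ [buf]) ++ [[c]]) [], ih (([] : List (List Char)) ++ [buf] ++ [[c]]) []]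
          simp
        · simp only [pvScan, hc, hb, if_true]
          rw [ih (toks ++ [[c]]) [], ih (([] : List (List Char)) ++ [[c]]) []]
          simp

theorem pvScan_sym (c : Char) (cs : List Char) (toks : List (List Char)) (buf : List Char)
    (h : pvIsSym c = true) :
    pvScan toks buf (c :: cs)
      = (if buf.isEmpty then toks else toks ++ [buf]) ++ [[c]] ++ pvScan [] [] cs := by
  simp only [pvScan, h, if_true]
  rw [pvScan_acc cs ((if buf.isEmpty = true then toks else toks ++ [buf]) ++ [[c]]) []]

-- the core: splitting the padded word equals the buffer scan
theorem pvMain :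
    ∀ (cs buf : List Char),
      (∀ c ∈ cs, PySem.Chars.isspace c = false) →
      PySem.Chars.split₀.go (pvPad (fun c => pvSymbols.contains c) cs) buf.reverse []
        = pvScan [] buf cs := by
  intro cs
  induction cs with
  | nil =>
      intro buf _
      rw [show pvPad (fun c => pvSymbols.contains c) [] = [] from rfl, pvGo_nil]
      cases h : buf.isEmpty <;> simp [pvScan, List.isEmpty_reverse, h]
  | cons c cs ih =>
      intro buf hns
      have hc : PySem.Chars.isspace c = false := hns c List.mem_cons_self
      have hcs : ∀ d ∈ cs, PySem.Chars.isspace d = false :=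
        fun d hd => hns d (List.mem_cons_of_mem c hd)
      have hspace : PySem.Chars.isspace ' ' = true := by decide
      cases hsym : pvSymbols.contains c
      · have hpad : pvPad (fun c => pvSymbols.contains c) (c :: cs)
            = c :: pvPad (fun c => pvSymbols.contains c) cs := by
          simp only [pvPad, List.flatMap_cons, hsym, Bool.false_eq_true, if_false,
            List.cons_append, List.nil_append]
        rw [hpad, pvGo_char _ _ _ _ hc,
          show (c :: buf.reverse) = (buf ++ [c]).reverse by simp,
          ih (buf ++ [c]) hcs]
        simp only [pvScan, pvIsSym_eq, hsym, Bool.false_eq_true, if_false]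
      · have hpad : pvPad (fun c => pvSymbols.contains c) (c :: cs)
            = ' ' :: c :: ' ' :: pvPad (fun c => pvSymbols.contains c) cs := by
          simp only [pvPad, List.flatMap_cons, hsym, if_true, List.cons_append, List.nil_append]
        have ih0 : PySem.Chars.split₀.go (pvPad (fun c => pvSymbols.contains c) cs) [] []
            = pvScan [] [] cs := by
          have h := ih [] hcs; simpa using h
        rw [hpad, pvGo_space _ _ _ _ hspace]
        cases hb : buf.isEmpty
        · simp only [List.isEmpty_reverse, hb, Bool.false_eq_true, if_false,
            List.reverse_reverse]
          rw [show (c :: ' ' :: pvPad (fun c => pvSymbols.contains c) cs)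
              = [c] ++ (' ' :: pvPad (fun c => pvSymbols.contains c) cs) from rfl,
            pvGo_run [c] _ [] [buf] (by simpa using hc)]
          simp only [List.reverse_cons, List.reverse_nil, List.nil_append, List.append_nil]
          rw [pvGo_space _ _ _ _ hspace]
          simp only [List.isEmpty_cons, Bool.false_eq_true, if_false, List.reverse_cons,
            List.reverse_nil, List.nil_append]
          rw [pvGo_acc _ [] [[c], buf], ih0,
            pvScan_sym c cs [] buf ((pvIsSym_eq c).trans hsym)]
          simp [hb]
        · have hbnil : buf = [] := by simpa using hb
          subst hbnil
          simp only [List.isEmpty_nil, if_true, List.reverse_nil]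
          rw [show (c :: ' ' :: pvPad (fun c => pvSymbols.contains c) cs)
              = [c] ++ (' ' :: pvPad (fun c => pvSymbols.contains c) cs) from rfl,
            pvGo_run [c] _ [] [] (by simpa using hc)]
          simp only [List.reverse_cons, List.reverse_nil, List.nil_append, List.append_nil]
          rw [pvGo_space _ _ _ _ hspace]
          simp only [List.isEmpty_cons, Bool.false_eq_true, if_false, List.reverse_cons,
            List.reverse_nil, List.nil_append]
          rw [pvGo_acc _ [] [[c]], ih0,
            pvScan_sym c cs [] [] ((pvIsSym_eq c).trans hsym)]
          simp

theorem pvWord_eq (w : List Char) (h : ∀ c ∈ w, PySem.Chars.isspace c = false) :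
    PySem.Chars.split₀ (pvSplitTight w) = pvScan [] [] w := by
  rw [pvSplitTight_pad, PySem.Chars.split₀]
  have := pvMain w [] h
  simpa using this

theorem pvFold_eq :
    ∀ (ws : List (List Char)) (s : List (List Char)),
      (∀ w ∈ ws, ∀ c ∈ w, PySem.Chars.isspace c = false) →
      ws.foldl (fun s w =>
          if pvIsString w then s ++ [w] else s ++ PySem.Chars.split₀ (pvSplitTight w)) s
        = ws.foldl (fun toks w =>
          if pvIsStringAlt w then toks ++ [w] else pvScan toks [] w) s := by
  intro ws
  induction ws with
  | nil => intro s _; rfl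
  | cons w ws ih =>
      intro s h
      simp only [List.foldl_cons]
      have hstep : (if pvIsString w then s ++ [w] else s ++ PySem.Chars.split₀ (pvSplitTight w))
          = (if pvIsStringAlt w then s ++ [w] else pvScan s [] w) := by
        have halt : pvIsStringAlt w = pvIsString w := rfl
        rw [halt]
        cases hs : pvIsString w
        · simp only [Bool.false_eq_true, if_false]
          rw [pvScan_acc w s [], pvWord_eq w (h w List.mem_cons_self)]
        · simp only [if_true]
      rw [hstep]
      exact ih _ (fun v hv c hc => h v (List.mem_cons_of_mem w hv) c hc)

-- ===== VERDICT (by name: the statement is the Claim_ definition above) =====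
theorem split_line_spec : Claim_equal_split_line := by
  intro line _
  unfold Spec_split_line split_line split_line_alt
  exact congrArg (List.map String.ofList) (pvFold_eq _ [] (pvWords_nonspace line.toList))
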